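-- pv_equiv track=rewrite | github.com/dpetrovych/nonopy | nonopy/line/combinations.py | calculate_count
-- ===== SOURCE A (Python) =====
-- MIN_BLOCK_SPACE = 1
--
-- def rec_block_tigth_positions(t):
--         head, tail = t[0], t[1:]
--         if not tail:
--             return [(head, head)]
--
--         tail_pos = rec_block_tigth_positions(tail)
--         last_pos = tail_pos[-1][1]
--         tail_pos.append((head, last_pos + head + MIN_BLOCK_SPACE))
--         return tail_pos
--
-- def calculate_count(task, length):
--     """
--     Calculates how many combinations of spans (thus block positions) available for a specific task for a line length
--     Helps to prioritize reduce operations before calculating actual spans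
--     """
--     block_pos_pairs = rec_block_tigth_positions(task)
--
--     def rec_count(i, space_len):
--         block, tail_pos = block_pos_pairs[i]
--         move_space = space_len - tail_pos + 1
--
--         if i == 0:
--             return move_space
--
--         next_i = i - 1
--         return sum(
--             rec_count(next_i, space_len - block - step - MIN_BLOCK_SPACE)
--             for step in range(0, move_space))
--
--     return rec_count(len(block_pos_pairs) - 1, length)
-- ===== SOURCE B (Python) =====
-- def calculate_count(task, length):
--     """
--     Calculates how many combinations of spans (thus block positions) available for a specific task for a line length
--     Stars-and-bars closed form: C(slack + k, k) with slack = length - (sum(task) + k - 1).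
--     """
--     k = len(task)
--     slack = length - sum(task) - (k - 1)
--     if slack < 0:
--         return 0
--     r = 1
--     for i in range(1, k + 1):
--         r = r * (slack + i) // i
--     return r
-- ===== Notes on version B (the rewrite author's own statement) =====
-- stated objective: faster
-- what changed: Replaces the exponential nested-sum recursion over block positions by the stars-and-bars closed form C(slack+k, k), computed with a k-step binomial product.
-- intended difference: On a single-block task with length <= task[0]-2 (no placement fits), A returns the negative value length-task[0]+1 while B returns the intended count 0. — e.g. on calculate_count([3], 0): A returns -2, B returns 0
import Mathlib
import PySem

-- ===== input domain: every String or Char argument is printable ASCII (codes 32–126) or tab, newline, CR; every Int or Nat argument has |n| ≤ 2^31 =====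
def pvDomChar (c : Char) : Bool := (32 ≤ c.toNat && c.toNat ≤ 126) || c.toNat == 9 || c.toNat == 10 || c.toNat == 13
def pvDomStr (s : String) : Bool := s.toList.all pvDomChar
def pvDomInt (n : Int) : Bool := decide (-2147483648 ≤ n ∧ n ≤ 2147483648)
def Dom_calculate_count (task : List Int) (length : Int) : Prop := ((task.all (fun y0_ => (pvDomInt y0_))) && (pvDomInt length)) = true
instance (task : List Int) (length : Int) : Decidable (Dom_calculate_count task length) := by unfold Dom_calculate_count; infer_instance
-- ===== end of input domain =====

-- B replaces A's exponential nested-sum recursion by the stars-and-bars closed form C(slack+k, k) (objective: faster).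

-- ===== PORT A =====
-- MIN_BLOCK_SPACE = 1 is inlined as the literal 1.
def rec_block_tigth_positions : List Int → List (Int × Int)
  | [] => []          -- Python raises IndexError on []; excluded by Pre_calculate_count
  | head :: tail =>
    match tail with
    | [] => [(head, head)]
    | _ :: _ =>
      let tail_pos := rec_block_tigth_positions tail
      let last_pos := (tail_pos.getLast?.getD (0, 0)).2
      tail_pos ++ [(head, last_pos + head + 1)]

-- inner rec_count of A; pairs[i] is always indexed in range during the call from calculate_count
def rec_count (pairs : List (Int × Int)) : Nat → Int → Int
  | 0, space_len => space_len - (pairs.getD 0 (0, 0)).2 + 1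
  | (i+1), space_len =>
    let p := pairs.getD (i+1) (0, 0)
    let move_space := space_len - p.2 + 1
    (PySem.List.pyRange 0 move_space 1).foldl
      (fun acc step => acc + rec_count pairs i (space_len - p.1 - step - 1)) 0

def calculate_count (task : List Int) (length : Int) : Int :=
  let block_pos_pairs := rec_block_tigth_positions task
  rec_count block_pos_pairs (block_pos_pairs.length - 1) length

-- ===== PORT B =====
def calculate_count_alt (task : List Int) (length : Int) : Int :=
  let k : Int := task.length
  let slack := length - task.sum - (k - 1)
  if slack < 0 then 0
  else (PySem.List.pyRange 1 (k + 1) 1).foldl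
    (fun r i => PySem.Int.floordiv (r * (slack + i)) i) 1

-- ===== PRECONDITION & SPEC =====
-- A raises IndexError on the empty task list (t[0] on []); Pre_ excludes exactly that.
def Pre_calculate_count (task : List Int) (length : Int) : Prop := task ≠ []
instance (task : List Int) (length : Int) : Decidable (Pre_calculate_count task length) := by unfold Pre_calculate_count; infer_instance
def pvWitness_calculate_count : List Int × Int := ([2, 1], 7)

-- On a single-block task with length ≤ task[0]-2 (no placement fits) A returns the negative value
-- length-task[0]+1, while B returns the intended count 0.
def D_calculate_count (task : List Int) (length : Int) : Prop :=
  task.length = 1 ∧ length ≤ task.headD 0 - 2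
instance (task : List Int) (length : Int) : Decidable (D_calculate_count task length) := by unfold D_calculate_count; infer_instance

def Spec_calculate_count (task : List Int) (length : Int) (out : Int) : Prop :=
  ¬ D_calculate_count task length → out = calculate_count_alt task length
instance (task : List Int) (length : Int) (out : Int) : Decidable (Spec_calculate_count task length out) := by unfold Spec_calculate_count; infer_instance

def pvDiffWitness_calculate_count : List Int × Int := ([3], 0)
def pvDiffWitnessOut_calculate_count : Int × Int := (-2, 0)

-- ===== CLAIM (what is proved, stated in full; the proofs are below) =====
def Claim_unchanged_calculate_count : Prop := ∀ (task : List Int) (length : Int), Dom_calculate_count task length → Pre_calculate_count task length → Spec_calculate_count task length (calculate_count task length)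
def Claim_changed_calculate_count : Prop := Dom_calculate_count (pvDiffWitness_calculate_count.1) (pvDiffWitness_calculate_count.2) ∧ Pre_calculate_count (pvDiffWitness_calculate_count.1) (pvDiffWitness_calculate_count.2) ∧ D_calculate_count (pvDiffWitness_calculate_count.1) (pvDiffWitness_calculate_count.2) ∧ calculate_count (pvDiffWitness_calculate_count.1) (pvDiffWitness_calculate_count.2) = pvDiffWitnessOut_calculate_count.1 ∧ calculate_count_alt (pvDiffWitness_calculate_count.1) (pvDiffWitness_calculate_count.2) = pvDiffWitnessOut_calculate_count.2 ∧ pvDiffWitnessOut_calculate_count.1 ≠ pvDiffWitnessOut_calculate_count.2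
def Claim_exact_calculate_count : Prop := ∀ (task : List Int) (length : Int), Dom_calculate_count task length → Pre_calculate_count task length → D_calculate_count task length → calculate_count task length ≠ calculate_count_alt task length
-- ===== LEMMAS AND PROOFS =====

-- tight total length of a task: sum of blocks plus one separator between consecutive blocks
def tightLen (t : List Int) : Int := t.sum + t.length - 1

-- F i d = number of placements of the blocks up to pair index i into remaining slack d
def Fcnt (i : Nat) (d : Int) : Int := if d < 0 then 0 else ((d.toNat + i + 1).choose (i + 1) : Int)

theorem rbt_cons_cons (h a : Int) (b : List Int) :
    rec_block_tigth_positions (h :: a :: b)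
      = rec_block_tigth_positions (a :: b)
        ++ [(h, ((rec_block_tigth_positions (a :: b)).getLast?.getD (0,0)).2 + h + 1)] := rfl

theorem rbt_length : ∀ (t : List Int), (rec_block_tigth_positions t).length = t.length := by
  intro t
  induction t with
  | nil => rfl
  | cons h tl ih =>
    cases tl with
    | nil => rfl
    | cons a b => simp [rec_block_tigth_positions] at ih ⊢; omega

theorem rbt_last : ∀ (t : List Int), t ≠ [] →
    ((rec_block_tigth_positions t).getLast?.getD (0, 0)).2 = tightLen t := by
  intro t
  induction t with
  | nil => intro h; exact absurd rfl h
  | cons h tl ih =>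
    intro _
    cases tl with
    | nil => simp [rec_block_tigth_positions, tightLen]
    | cons a b =>
      have := ih (by simp)
      simp [rec_block_tigth_positions, tightLen] at this ⊢
      omega

theorem rbt_chain : ∀ (t : List Int) (i : Nat), i + 1 < (rec_block_tigth_positions t).length →
    ((rec_block_tigth_positions t).getD (i+1) (0,0)).2
      = ((rec_block_tigth_positions t).getD i (0,0)).2
        + ((rec_block_tigth_positions t).getD (i+1) (0,0)).1 + 1 := by
  intro t
  induction t with
  | nil => intro i hi; simp [rec_block_tigth_positions] at hi
  | cons h tl ih =>
    intro i hi
    cases tl with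
    | nil => simp [rec_block_tigth_positions] at hi
    | cons a b =>
      rw [rbt_cons_cons] at hi ⊢
      set P := rec_block_tigth_positions (a :: b) with hP
      rw [List.length_append] at hi
      simp only [List.length_cons, List.length_nil] at hi
      by_cases hlt : i + 1 < P.length
      · rw [List.getD_append _ _ _ _ hlt,
            List.getD_append _ _ _ _ (show i < P.length by omega)]
        exact ih i hlt
      · -- i + 1 = P.length : the (i+1)-th entry is the appended pair, the i-th is the last of P
        have heq : i + 1 = P.length := by omega
        have h1 : ∀ q : Int × Int, (P ++ [q]).getD (i+1) (0,0) = q := by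
          intro q
          rw [List.getD_eq_getElem?_getD, List.getElem?_append_right (le_of_eq heq.symm)]
          simp [← heq]
        have h2 : ∀ q : Int × Int, (P ++ [q]).getD i (0,0) = P.getD i (0,0) := by
          intro q
          rw [List.getD_append _ _ _ _ (show i < P.length by rw [← heq]; omega)]
        have h3 : P.getD i (0,0) = P.getLast?.getD (0,0) := by
          rw [List.getD_eq_getElem?_getD, List.getLast?_eq_getElem?]
          congr 1
          rw [← heq]
          simp
        rw [h1, h2, h3]

theorem hockey (i : Nat) : ∀ (n : Nat),
    (∑ j ∈ Finset.range (n + 1), ((j + i).choose i)) = (n + i + 1).choose (i + 1) := by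
  intro n
  induction n with
  | zero => simp
  | succ m ih =>
    rw [Finset.sum_range_succ, ih, show m + 1 + i = m + i + 1 from by omega,
        Nat.choose_succ_succ (m + i + 1) i]
    simp only [Nat.succ_eq_add_one]
    omega

theorem sum_pyRange (m : Int) (g : Int → Int) :
    ((PySem.List.pyRange 0 m 1).map g).sum = ∑ j ∈ Finset.range m.toNat, g (j : Int) := by
  rw [PySem.List.pyRange_one, List.map_map]
  have : m - 0 = m := by ring
  rw [this]
  congr 1
  apply List.map_congr_left
  intro k _
  simp

theorem foldl_add_eq_map_sum (l : List Int) (f : Int → Int) :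
    l.foldl (fun acc step => acc + f step) 0 = (l.map f).sum := by
  simp [List.sum_eq_foldl, List.foldl_map]

theorem rec_count_F (pairs : List (Int × Int))
    (hch : ∀ i : Nat, i + 1 < pairs.length →
      (pairs.getD (i+1) (0,0)).2 = (pairs.getD i (0,0)).2 + (pairs.getD (i+1) (0,0)).1 + 1) :
    ∀ (i : Nat), i < pairs.length → ∀ (s : Int),
      (0 ≤ s - (pairs.getD i (0,0)).2 ∨ i ≠ 0) →
      rec_count pairs i s = Fcnt i (s - (pairs.getD i (0,0)).2) := by
  intro i
  induction i with
  | zero =>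
    intro _ s hs
    have hd : 0 ≤ s - (pairs.getD 0 (0,0)).2 := by
      rcases hs with h | h
      · exact h
      · exact absurd rfl h
    rw [rec_count, Fcnt, if_neg (not_lt.mpr hd), Nat.choose_one_right]
    omega
  | succ i ih =>
    intro hlen s _
    rw [rec_count]
    rw [foldl_add_eq_map_sum]
    set p := pairs.getD (i+1) (0,0) with hp
    set d := s - p.2 with hd
    have hchain := hch i hlen
    by_cases hneg : d < 0
    · rw [PySem.List.pyRange_one_eq_nil (by omega)]
      simp [Fcnt, if_pos hneg]
    · rw [not_lt] at hneg
      have hmap : (PySem.List.pyRange 0 (s - p.2 + 1) 1).map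
            (fun step => rec_count pairs i (s - p.1 - step - 1))
          = (PySem.List.pyRange 0 (s - p.2 + 1) 1).map (fun step => Fcnt i (d - step)) := by
        apply List.map_congr_left
        intro step hmem
        rw [PySem.List.mem_pyRange_one] at hmem
        have harg : s - p.1 - step - 1 - (pairs.getD i (0,0)).2 = d - step := by
          rw [hd, hchain]; ring
        rw [ih (by omega) _ (Or.inl (by rw [harg]; omega)), harg]
      rw [hmap, ← hd, sum_pyRange]
      have hn : (d + 1).toNat = d.toNat + 1 := by omega
      rw [hn]
      have hterm : ∀ j ∈ Finset.range (d.toNat + 1), Fcnt i (d - j) = (((d.toNat - j) + (i+1)).choose (i+1) : Int) := by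
        intro j hj
        rw [Finset.mem_range] at hj
        rw [Fcnt, if_neg (by omega)]
        congr 2
        omega
      rw [Finset.sum_congr rfl hterm, ← Nat.cast_sum]
      rw [Fcnt, if_neg (by omega)]
      have hhs := hockey (i+1) d.toNat
      rw [← Finset.sum_range_reflect (fun j => (j + (i+1)).choose (i+1)) (d.toNat+1)] at hhs
      rw [show (∑ j ∈ Finset.range (d.toNat + 1), ((d.toNat + 1 - 1 - j) + (i+1)).choose (i+1))
            = ∑ j ∈ Finset.range (d.toNat + 1), ((d.toNat - j) + (i+1)).choose (i+1) from
          Finset.sum_congr rfl (fun j hj => by congr 2)] at hhs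
      rw [hhs]

theorem alt_prod (slack : Int) (hs : 0 ≤ slack) : ∀ (k : Nat),
    (PySem.List.pyRange 1 ((k : Int) + 1) 1).foldl
      (fun r i => PySem.Int.floordiv (r * (slack + i)) i) 1
    = ((slack.toNat + k).choose k : Int) := by
  intro k
  induction k with
  | zero => simp [PySem.List.pyRange_one_eq_nil]
  | succ m ih =>
    rw [show ((m + 1 : Nat) : Int) + 1 = ((m : Int) + 1) + 1 from by push_cast; ring,
        PySem.List.pyRange_one_succ_right (by omega), List.foldl_append, ih]
    show PySem.Int.floordiv (((slack.toNat + m).choose m : Int) * (slack + ((m:Int) + 1))) ((m:Int) + 1)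
        = ((slack.toNat + (m+1)).choose (m+1) : Int)
    have hmul : (((slack.toNat + m).choose m : Int)) * (slack + ((m:Int) + 1))
        = (((slack.toNat + m + 1).choose (m+1) : Int)) * ((m:Int) + 1) := by
      have hn := Nat.add_one_mul_choose_eq (slack.toNat + m) m
      have h2 : (slack.toNat + m).choose m * (slack.toNat + m + 1)
          = (slack.toNat + m + 1).choose (m+1) * (m+1) := by
        simpa [Nat.succ_eq_add_one, Nat.mul_comm] using hn
      have h3 : slack + ((m:Int) + 1) = ((slack.toNat + m + 1 : Nat) : Int) := by push_cast; omega
      rw [h3, ← Nat.cast_mul, h2]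
      push_cast
      ring
    rw [hmul]
    have hpos : ((m:Int) + 1) ≠ 0 := by omega
    rw [show (slack.toNat + (m+1)) = slack.toNat + m + 1 from by omega]
    unfold PySem.Int.floordiv
    exact Int.mul_fdiv_cancel _ hpos

-- ===== VERDICT (by name: the statement is the Claim_ definition above) =====
theorem getD_last_tight (task : List Int) (hne : task ≠ []) :
    ((rec_block_tigth_positions task).getD ((rec_block_tigth_positions task).length - 1) (0,0)).2
      = tightLen task := by
  rw [← rbt_last task hne, List.getD_eq_getElem?_getD, List.getLast?_eq_getElem?]

theorem calc_single (a : Int) (length : Int) :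
    calculate_count [a] length = length - a + 1 := by
  simp [calculate_count, rec_block_tigth_positions, rec_count]

theorem calculate_count_spec : Claim_unchanged_calculate_count := by
  unfold Claim_unchanged_calculate_count
  intro task length _ hpre hnd
  set pairs := rec_block_tigth_positions task with hpairs
  have hklen : pairs.length = task.length := rbt_length task
  have hk1 : 1 ≤ task.length := by
    cases task with
    | nil => exact absurd rfl hpre
    | cons a tl => simp
  have hlastD : (pairs.getD (pairs.length - 1) (0,0)).2 = tightLen task :=
    getD_last_tight task hpre
  have hslack : length - task.sum - ((task.length : Int) - 1) = length - tightLen task := by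
    unfold tightLen; ring
  by_cases hneg : length - tightLen task < 0
  · -- slack < 0 : B returns 0
    have hB : calculate_count_alt task length = 0 := by
      unfold calculate_count_alt
      rw [if_pos (by omega)]
    rw [hB]
    by_cases hk2 : 2 ≤ task.length
    · -- k ≥ 2 : A's top index is nonzero, rec_count_F applies with the right disjunct
      have hF := rec_count_F pairs (rbt_chain task) (pairs.length - 1)
        (by omega) length (Or.inr (by omega))
      unfold calculate_count
      rw [← hpairs, hF, hlastD, Fcnt, if_pos hneg]
    · -- k = 1 : task = [a]; ¬D_ forces slack = -1, where A is also 0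
      have h1 : task.length = 1 := by omega
      obtain ⟨a, rfl⟩ : ∃ a, task = [a] := by
        cases task with
        | nil => exact absurd rfl hpre
        | cons a tl =>
          cases tl with
          | nil => exact ⟨a, rfl⟩
          | cons b tl2 => simp at h1
      have hd : ¬((1:Nat) = 1 ∧ length ≤ a - 2) := by
        unfold D_calculate_count at hnd
        simpa using hnd
      have htl : tightLen [a] = a := by unfold tightLen; simp
      rw [calc_single]
      rw [htl] at hneg
      omega
  · -- slack ≥ 0 : rec_count_F applies with the left disjunct; both sides are C(slack+k, k)
    rw [not_lt] at hneg
    have hF := rec_count_F pairs (rbt_chain task) (pairs.length - 1)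
      (by omega) length (Or.inl (by rw [hlastD]; omega))
    unfold calculate_count
    rw [← hpairs, hF, hlastD, Fcnt, if_neg (by omega)]
    unfold calculate_count_alt
    rw [if_neg (by omega), hslack, alt_prod _ hneg task.length]
    congr 2 <;> omega

theorem calculate_count_tight : Claim_exact_calculate_count := by
  unfold Claim_exact_calculate_count
  intro task length _ hpre hd
  unfold D_calculate_count at hd
  obtain ⟨h1, h2⟩ := hd
  obtain ⟨a, rfl⟩ : ∃ a, task = [a] := by
    cases task with
    | nil => exact absurd rfl hpre
    | cons a tl =>
      cases tl with
      | nil => exact ⟨a, rfl⟩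
      | cons b tl2 => simp at h1
  simp only [List.headD] at h2
  rw [calc_single]
  have hB : calculate_count_alt [a] length = 0 := by
    unfold calculate_count_alt
    rw [if_pos (by simp; omega)]
  rw [hB]
  omega

theorem calculate_count_changed : Claim_changed_calculate_count := by
  unfold Claim_changed_calculate_count; decide
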